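-- pv_equiv track=rewrite | github.com/PatternAtlas/sap-generator | src/algo.py | create_joined_permuation
-- ===== SOURCE A (Python) =====
-- def create_joined_permuation(list_of_lists):
--     if len(list_of_lists) == 1:
--         return list_of_lists
--
--     joined_permutations = []
--     for i in list_of_lists[0]:
--         for j in list_of_lists[1]:
--             joined_permutations.append(i + j)
--
--     list_of_lists = list_of_lists[2:]
--     list_of_lists.insert(0, joined_permutations)
--     return create_joined_permuation(list_of_lists)
-- ===== SOURCE B (Python) =====
-- def create_joined_permuation(list_of_lists):
--     if len(list_of_lists) == 1:
--         return list_of_lists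
--     acc = list_of_lists[0]
--     for lst in list_of_lists[1:]:
--         acc = [i + j for i in acc for j in lst]
--     return [acc]
-- ===== Notes on version B (the rewrite author's own statement) =====
-- stated objective: simpler
-- what changed: Replaced A's tail recursion (which rebuilds the list by slicing off two heads and re-inserting the joined list) with a single iterative accumulator loop over the tail, building each product level with a comprehension.
import Mathlib
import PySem

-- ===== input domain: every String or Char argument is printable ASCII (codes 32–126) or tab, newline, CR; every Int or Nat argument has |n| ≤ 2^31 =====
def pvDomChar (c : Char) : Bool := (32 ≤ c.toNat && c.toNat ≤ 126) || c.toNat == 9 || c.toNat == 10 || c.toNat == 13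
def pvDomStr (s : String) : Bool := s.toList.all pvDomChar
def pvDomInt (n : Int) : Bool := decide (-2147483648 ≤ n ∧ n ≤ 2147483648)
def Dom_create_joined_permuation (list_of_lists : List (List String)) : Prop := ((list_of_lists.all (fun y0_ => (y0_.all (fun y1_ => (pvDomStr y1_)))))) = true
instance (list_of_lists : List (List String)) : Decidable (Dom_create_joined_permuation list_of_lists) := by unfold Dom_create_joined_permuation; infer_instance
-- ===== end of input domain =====

-- B replaces A's slice-and-reinsert tail recursion with a single iterative accumulator loop (simpler decomposition).


-- ===== PORT A =====
-- nested for-loops appending i + j, as in A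
def cjpJoin (a b : List String) : List String :=
  a.foldl (fun acc i => b.foldl (fun acc2 j => acc2 ++ [i ++ j]) acc) []

def create_joined_permuation (list_of_lists : List (List String)) : List (List String) :=
  if list_of_lists.length = 1 then list_of_lists
  else
    match list_of_lists with
    | a :: b :: rest => create_joined_permuation (cjpJoin a b :: rest)
    | _ => []  -- Python raises IndexError on []; excluded by Pre_
termination_by list_of_lists.length
decreasing_by simp

-- ===== PORT B =====
def create_joined_permuation_alt (list_of_lists : List (List String)) : List (List String) :=
  if list_of_lists.length = 1 then list_of_lists
  else
    match list_of_lists with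
    | a :: rest =>
        [rest.foldl (fun acc lst => acc.flatMap (fun i => lst.map (fun j => i ++ j))) a]
    | [] => []  -- Python raises IndexError; excluded by Pre_

-- ===== PRECONDITION & SPEC =====
-- Both A and B raise IndexError on the empty list, excluded here.
def Pre_create_joined_permuation (list_of_lists : List (List String)) : Prop :=
  list_of_lists ≠ []
instance (list_of_lists : List (List String)) : Decidable (Pre_create_joined_permuation list_of_lists) := by unfold Pre_create_joined_permuation; infer_instance
def pvWitness_create_joined_permuation : List (List String) := [["a", "b"], ["c"]]

def Spec_create_joined_permuation (list_of_lists : List (List String)) (out : List (List String)) : Prop := out = create_joined_permuation_alt list_of_lists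
instance (list_of_lists : List (List String)) (out : List (List String)) : Decidable (Spec_create_joined_permuation list_of_lists out) := by unfold Spec_create_joined_permuation; infer_instance

-- ===== CLAIM =====
def Claim_equal_create_joined_permuation : Prop := ∀ (list_of_lists : List (List String)), Dom_create_joined_permuation list_of_lists → Pre_create_joined_permuation list_of_lists → Spec_create_joined_permuation list_of_lists (create_joined_permuation list_of_lists)

-- ===== LEMMAS AND PROOFS =====

theorem cjpJoin_eq_flatMap (a b : List String) :
    cjpJoin a b = a.flatMap (fun i => b.map (fun j => i ++ j)) := by
  unfold cjpJoin
  rw [show (fun (acc : List String) (i : String) => b.foldl (fun acc2 j => acc2 ++ [i ++ j]) acc)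
        = (fun acc i => acc ++ b.map (fun j => i ++ j)) from
      funext fun acc => funext fun i => PySem.List.foldl_append_singleton_eq_map ..]
  simpa using PySem.List.foldl_append_eq_flatMap (l := a) (g := fun i => b.map (fun j => i ++ j)) (acc := [])

theorem cjp_main (rest : List (List String)) :
    ∀ a b, create_joined_permuation (a :: b :: rest)
      = [(b :: rest).foldl (fun acc lst => acc.flatMap (fun i => lst.map (fun j => i ++ j))) a] := by
  induction rest with
  | nil =>
      intro a b
      rw [create_joined_permuation]
      rw [if_neg (by simp)]
      rw [create_joined_permuation]
      rw [if_pos (by simp)]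
      · simp only [List.foldl_cons, List.foldl_nil, cjpJoin_eq_flatMap]
      · intro _ _ _ h; simp at h
  | cons c rs ih =>
      intro a b
      rw [create_joined_permuation]
      rw [if_neg (by simp)]
      rw [ih (cjpJoin a b) c]
      simp only [List.foldl_cons, cjpJoin_eq_flatMap]

-- ===== VERDICT =====
theorem create_joined_permuation_spec : Claim_equal_create_joined_permuation := by
  intro l _ hpre
  unfold Spec_create_joined_permuation
  match l with
  | [] => exact absurd rfl hpre
  | [a] =>
      rw [create_joined_permuation]
      rw [if_pos (by simp)]
      rw [create_joined_permuation_alt]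
      · rw [if_pos (by simp)]
      · intro _ _ _ h; simp at h
  | a :: b :: rest =>
      rw [cjp_main rest a b]
      rw [create_joined_permuation_alt]
      rw [if_neg (by simp)]
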